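-- pv_equiv track=rewrite | github.com/guoheng/EulerPy | p145.py | Reversible
-- ===== SOURCE A (Python) =====
-- def Reversible(d):
--     l = len(d)
--     c = 0
--     for i in range(l):
--         s = d[i]+d[l-1-i]+c
--         if (s%2 == 0):
--             return False
--         c = s//10
--     return True
-- ===== SOURCE B (Python) =====
-- def Reversible(d):
--     n = 0
--     for x in d:
--         n = n * 10 + x
--     rev = 0
--     for x in reversed(d):
--         rev = rev * 10 + x
--     s = n + rev
--     for _ in range(len(d)):
--         if (s % 10) % 2 == 0:
--             return False
--         s //= 10
--     return True
-- ===== Notes on version B (the rewrite author's own statement) =====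
-- stated objective: alternative
-- what changed: B rebuilds the number and its reversal as integers via Horner's rule, adds them once, and then checks parity of the low len(d) digits of the single sum, replacing A's interleaved pair-sum-with-carry loop over index pairs.
import Mathlib
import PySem

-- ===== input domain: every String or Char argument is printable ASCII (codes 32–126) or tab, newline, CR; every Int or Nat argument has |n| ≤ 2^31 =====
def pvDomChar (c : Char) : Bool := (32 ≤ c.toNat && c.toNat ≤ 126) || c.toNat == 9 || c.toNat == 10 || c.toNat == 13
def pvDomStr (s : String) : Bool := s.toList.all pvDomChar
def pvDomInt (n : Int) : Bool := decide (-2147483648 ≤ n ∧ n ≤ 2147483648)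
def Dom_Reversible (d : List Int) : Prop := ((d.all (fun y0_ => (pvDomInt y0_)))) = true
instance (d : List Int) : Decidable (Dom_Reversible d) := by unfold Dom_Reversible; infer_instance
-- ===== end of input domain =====

-- B replaces A's interleaved pair-sum/carry loop by a build-then-extract decomposition
-- (reconstruct n and reverse(n), add once, test parity of the low len(d) digits); same values, similar cost.

-- ===== PORT A =====
-- the loop 'for i in range(l)' with early return, carried as structural recursion on the index list;
-- d[i] is ported as pyGetD (exact here: every index produced by the loop is in range)
def ReversALoop (d : List Int) : List Int → Int → Bool
  | [], _ => true
  | i :: rest, c =>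
    let s := PySem.List.pyGetD d i 0 + PySem.List.pyGetD d ((d.length : Int) - 1 - i) 0 + c
    if PySem.Int.mod s 2 = 0 then false
    else ReversALoop d rest (PySem.Int.floordiv s 10)

def Reversible (d : List Int) : Bool :=
  ReversALoop d (PySem.List.pyRange 0 (d.length : Int) 1) 0

-- ===== PORT B =====
-- n = n*10 + x over the list (Horner build)
def pvBuildNum : List Int → Int → Int
  | [], n => n
  | x :: xs, n => pvBuildNum xs (n * 10 + x)

-- the extraction loop: len(d) iterations, low digit parity test, s //= 10
def pvCheckDigits : Nat → Int → Bool
  | 0, _ => true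
  | k + 1, s =>
    if PySem.Int.mod (PySem.Int.mod s 10) 2 = 0 then false
    else pvCheckDigits k (PySem.Int.floordiv s 10)

def Reversible_alt (d : List Int) : Bool :=
  pvCheckDigits d.length (pvBuildNum d 0 + pvBuildNum d.reverse 0)

-- ===== PRECONDITION & SPEC =====
def Spec_Reversible (d : List Int) (out : Bool) : Prop := out = Reversible_alt d
instance (d : List Int) (out : Bool) : Decidable (Spec_Reversible d out) := by unfold Spec_Reversible; infer_instance

-- ===== CLAIM (what is proved, stated in full; the proofs are below) =====
def Claim_equal_Reversible : Prop := ∀ (d : List Int), Dom_Reversible d → Spec_Reversible d (Reversible d)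

-- ===== LEMMAS AND PROOFS =====

-- little-endian value of a digit list
def pvVal : List Int → Int
  | [] => 0
  | x :: xs => x + 10 * pvVal xs

-- the common abstract loop: pair sums with carry
def pvLoopP : List Int → Int → Bool
  | [], _ => true
  | a :: as, c =>
    if PySem.Int.mod (a + c) 2 = 0 then false
    else pvLoopP as (PySem.Int.floordiv (a + c) 10)

theorem reversALoop_eq_loopP (d : List Int) (is : List Int) (c : Int) :
    ReversALoop d is c =
      pvLoopP (is.map (fun i =>
        PySem.List.pyGetD d i 0 + PySem.List.pyGetD d ((d.length : Int) - 1 - i) 0)) c := by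
  induction is generalizing c with
  | nil => rfl
  | cons i rest ih =>
    simp only [ReversALoop, pvLoopP, List.map_cons]
    split_ifs with h
    · rfl
    · exact ih _

theorem pairs_eq_zipWith (d : List Int) :
    (PySem.List.pyRange 0 (d.length : Int) 1).map (fun i =>
        PySem.List.pyGetD d i 0 + PySem.List.pyGetD d ((d.length : Int) - 1 - i) 0)
      = List.zipWith (· + ·) d d.reverse := by
  apply List.ext_getElem
  · simp [PySem.List.length_pyRange_one]
  · intro k h1 h2
    have hk : k < d.length := by
      simpa [PySem.List.length_pyRange_one] using h1
    have hkr : k < (PySem.List.pyRange 0 (d.length : Int) 1).length := by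
      rw [PySem.List.length_pyRange_one]; omega
    have hidx : (PySem.List.pyRange 0 (d.length : Int) 1)[k]'hkr = (k : Int) := by
      rw [PySem.List.getElem_pyRange_one]; ring
    simp only [List.getElem_map, hidx, List.getElem_zipWith, List.getElem_reverse]
    have h1' : PySem.List.pyGetD d (k : Int) 0 = d[k] := by
      rw [PySem.List.pyGetD_natCast]
      exact List.getD_eq_getElem d 0 hk
    have hnn : (0:Int) ≤ (d.length : Int) - 1 - (k : Int) := by omega
    have hlt : (d.length : Int) - 1 - (k : Int) < (d.length : Int) := by omega
    have h2' : PySem.List.pyGetD d ((d.length : Int) - 1 - (k : Int)) 0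
        = d[((d.length : Int) - 1 - (k : Int)).toNat]'(by omega) := by
      exact PySem.List.pyGetD_eq_getElem d 0 hnn hlt
    have ht : ((d.length : Int) - 1 - (k : Int)).toNat = d.length - 1 - k := by omega
    rw [h1', h2']
    simp only [ht]

theorem checkDigits_eq_loopP (a : List Int) (c : Int) :
    pvCheckDigits a.length (pvVal a + c) = pvLoopP a c := by
  induction a generalizing c with
  | nil => rfl
  | cons x xs ih =>
    simp only [pvVal, List.length_cons, pvCheckDigits, pvLoopP]
    have e10 : ∀ t : Int, PySem.Int.mod t 10 = t % 10 :=
      fun t => PySem.Int.mod_eq_emod_of_pos (by norm_num)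
    have e2 : ∀ t : Int, PySem.Int.mod t 2 = t % 2 :=
      fun t => PySem.Int.mod_eq_emod_of_pos (by norm_num)
    have ed : ∀ t : Int, PySem.Int.floordiv t 10 = t / 10 :=
      fun t => PySem.Int.floordiv_eq_ediv_of_pos (by norm_num)
    rw [e10, e2, e2, ed, ed]
    have hmod : (x + 10 * pvVal xs + c) % 10 % 2 = (x + c) % 2 := by omega
    have hdiv : (x + 10 * pvVal xs + c) / 10 = pvVal xs + (x + c) / 10 := by omega
    rw [hmod, hdiv]
    split_ifs with h
    · rfl
    · rw [← ed, ← ih]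

theorem val_append_singleton (ys : List Int) (x : Int) :
    pvVal (ys ++ [x]) = pvVal ys + x * 10 ^ ys.length := by
  induction ys with
  | nil => simp [pvVal]
  | cons y ys ih => simp [pvVal, ih]; ring

theorem buildNum_eq (xs : List Int) (n : Int) :
    pvBuildNum xs n = n * 10 ^ xs.length + pvVal xs.reverse := by
  induction xs generalizing n with
  | nil => simp [pvBuildNum, pvVal]
  | cons x xs ih =>
    simp only [pvBuildNum, List.reverse_cons, List.length_cons]
    rw [ih, val_append_singleton, List.length_reverse]
    ring

theorem val_zipWith_add (xs : List Int) (ys : List Int) (h : xs.length = ys.length) :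
    pvVal (List.zipWith (· + ·) xs ys) = pvVal xs + pvVal ys := by
  induction xs generalizing ys with
  | nil =>
    have : ys = [] := by
      cases ys with
      | nil => rfl
      | cons y ys => simp at h
    simp [this, pvVal]
  | cons x xs ih =>
    cases ys with
    | nil => simp at h
    | cons y ys =>
      simp only [List.zipWith_cons_cons, pvVal]
      rw [ih ys (by simpa using h)]
      ring

-- ===== VERDICT (by name: the statement is the Claim_ definition above) =====
theorem Reversible_spec : Claim_equal_Reversible := by
  intro d _
  unfold Spec_Reversible Reversible Reversible_alt
  rw [reversALoop_eq_loopP, pairs_eq_zipWith]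
  have hlen : (List.zipWith (· + ·) d d.reverse).length = d.length := by simp
  have hval : pvVal (List.zipWith (· + ·) d d.reverse) = pvVal d + pvVal d.reverse :=
    val_zipWith_add d d.reverse (by simp)
  have hb1 : pvBuildNum d 0 = pvVal d.reverse := by rw [buildNum_eq]; ring
  have hb2 : pvBuildNum d.reverse 0 = pvVal d := by
    rw [buildNum_eq, List.reverse_reverse]; ring
  rw [hb1, hb2, ← checkDigits_eq_loopP (List.zipWith (· + ·) d d.reverse) 0, hlen, hval]
  ring_nf
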